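-- pv_equiv track=rewrite | github.com/olehdevops/python_tasks | test_tasks.py | diagonal_reverse
-- ===== SOURCE A (Python) =====
-- def diagonal_reverse(matr):
--     len_matr = len(matr)
--     new_matr = []
--     for i in range(len_matr):
--         new_matr.append([])
--         for j in range(len_matr):
--             new_matr[i].append(matr[j][i])
--     return new_matr
-- ===== SOURCE B (Python) =====
-- def diagonal_reverse(matr):
--     its = [iter(row) for row in matr]
--     return [[next(it) for it in its] for _ in matr]
-- ===== Notes on version B (the rewrite author's own statement) =====
-- stated objective: alternative
-- what changed: B transposes by lockstep iteration: it creates one iterator per input row and builds each output row by drawing next() from every iterator (consuming the rows incrementally), instead of A's per-cell double indexing matr[j][i] into the whole matrix.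
import Mathlib
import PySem

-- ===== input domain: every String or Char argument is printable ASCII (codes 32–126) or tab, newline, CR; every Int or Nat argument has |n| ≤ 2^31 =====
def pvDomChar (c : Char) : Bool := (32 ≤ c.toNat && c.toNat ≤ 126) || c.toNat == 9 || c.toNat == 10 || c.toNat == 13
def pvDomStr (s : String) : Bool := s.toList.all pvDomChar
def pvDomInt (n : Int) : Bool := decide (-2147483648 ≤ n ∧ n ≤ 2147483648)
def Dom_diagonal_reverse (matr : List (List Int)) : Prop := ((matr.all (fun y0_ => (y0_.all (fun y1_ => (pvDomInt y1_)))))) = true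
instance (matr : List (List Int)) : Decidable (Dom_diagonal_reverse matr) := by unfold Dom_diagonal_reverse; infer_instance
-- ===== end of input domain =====

-- B transposes by lockstep iteration (one iterator per row, drained one element per output row) instead of A's per-cell double indexing; same O(n^2) cost, different traversal/state.


-- ===== PORT A =====
-- `new_matr[i].append(x)`: Python list-row append in place at index i
def pvAppendAt : List (List Int) → Nat → Int → List (List Int)
  | [], _, _ => []
  | r :: rs, 0, x => (r ++ [x]) :: rs
  | r :: rs, k+1, x => r :: pvAppendAt rs k x

-- literal port of A: build new_matr row by row; for each i append [] then gather matr[j][i].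
-- `.getD … 0` / `.getD … []` stand for Python indexing; exact under Pre_ (indices in range there).
def diagonal_reverse (matr : List (List Int)) : List (List Int) :=
  let len_matr := matr.length
  (List.range len_matr).foldl
    (fun new_matr i =>
      (List.range len_matr).foldl
        (fun nm j => pvAppendAt nm i ((matr.getD j []).getD i 0))
        (new_matr ++ [[]]))
    []

-- ===== PORT B =====
-- literal port of Source B: an iterator over a row is its unconsumed suffix; `next(it)` yields its head
-- (`.getD 0 0` — exact under Pre_, where every iterator holds enough elements) and advances it to its tail.
-- The outer `for _ in matr` threads (rows built so far, current iterator suffixes).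
def diagonal_reverse_alt (matr : List (List Int)) : List (List Int) :=
  let its := matr.map (fun row => row)
  (matr.foldl
    (fun (st : List (List Int) × List (List Int)) _ =>
      (st.1 ++ [st.2.map (fun it => it.getD 0 0)], st.2.map List.tail))
    ([], its)).1

-- ===== PRECONDITION & SPEC =====
-- Pre_: exactly the inputs where Python A returns (every row must have at least len(matr) entries,
-- else matr[j][i] raises IndexError; Python B exhausts an iterator on exactly the same inputs).
def Pre_diagonal_reverse (matr : List (List Int)) : Prop :=
  ∀ row ∈ matr, matr.length ≤ row.length
instance (matr : List (List Int)) : Decidable (Pre_diagonal_reverse matr) := by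
  unfold Pre_diagonal_reverse; infer_instance
def pvWitness_diagonal_reverse : List (List Int) := [[1, 2], [3, 4]]

def Spec_diagonal_reverse (matr : List (List Int)) (out : List (List Int)) : Prop := out = diagonal_reverse_alt matr
instance (matr : List (List Int)) (out : List (List Int)) : Decidable (Spec_diagonal_reverse matr out) := by unfold Spec_diagonal_reverse; infer_instance

-- ===== CLAIM (what is proved, stated in full; the proofs are below) =====
def Claim_equal_diagonal_reverse : Prop := ∀ (matr : List (List Int)), Dom_diagonal_reverse matr → Pre_diagonal_reverse matr → Spec_diagonal_reverse matr (diagonal_reverse matr)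

-- ===== LEMMAS AND PROOFS =====

-- the cell both programs read for output row r, column c
def pvCell (matr : List (List Int)) (c r : Nat) : Int := (matr.getD c []).getD r 0

-- the common closed form: output row r is the r-th column of matr
def pvT (matr : List (List Int)) : List (List Int) :=
  (List.range matr.length).map (fun r => (List.range matr.length).map (fun c => pvCell matr c r))

theorem pvAppendAt_eq (pref : List (List Int)) (r : List Int) (suf : List (List Int)) (x : Int) :
    pvAppendAt (pref ++ r :: suf) pref.length x = pref ++ (r ++ [x]) :: suf := by
  induction pref with
  | nil => rfl
  | cons p ps ih => simpa [pvAppendAt] using ih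

-- A's inner loop: repeated appends to row i (the last row) build that row
theorem innerA (l : List Nat) (f : Nat → Int) (i : Nat) (pref : List (List Int)) (r : List Int)
    (hi : pref.length = i) :
    l.foldl (fun nm j => pvAppendAt nm i (f j)) (pref ++ [r])
      = pref ++ [r ++ l.map f] := by
  subst hi
  induction l generalizing r with
  | nil => simp
  | cons j l ih =>
    have h1 : pvAppendAt (pref ++ [r]) pref.length (f j) = pref ++ [r ++ [f j]] := by
      simpa using pvAppendAt_eq pref r [] (f j)
    simp only [List.foldl_cons, h1, ih]
    simp

theorem A_eq_T (matr : List (List Int)) : diagonal_reverse matr = pvT matr := by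
  show (List.range matr.length).foldl _ [] = pvT matr
  suffices h : ∀ k, (List.range k).foldl
      (fun new_matr i =>
        (List.range matr.length).foldl
          (fun nm j => pvAppendAt nm i ((matr.getD j []).getD i 0))
          (new_matr ++ [[]]))
      []
      = (List.range k).map (fun r => (List.range matr.length).map (fun c => pvCell matr c r)) by
    exact h matr.length
  intro k
  induction k with
  | zero => rfl
  | succ k ih =>
    rw [List.range_succ, List.foldl_append, List.foldl_cons, List.foldl_nil, ih]
    have hlen : ((List.range k).map (fun r => (List.range matr.length).map (fun c => pvCell matr c r))).length = k := by simp
    rw [innerA (List.range matr.length) (fun j => (matr.getD j []).getD k 0) k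
        ((List.range k).map (fun r => (List.range matr.length).map (fun c => pvCell matr c r))) [] hlen,
       List.map_append]
    simp [pvCell]

-- every list equals the range-indexed map of its getD's
theorem map_eq_range_map (m : List (List Int)) (f : List Int → Int) :
    m.map f = (List.range m.length).map (fun c => f (m.getD c [])) := by
  apply List.ext_getElem
  · simp
  · intro i h1 h2
    simp [List.getD_eq_getElem?_getD, (by simpa using h2 : i < m.length)]


-- B's loop invariant: with iterator suffixes dropped k deep, the remaining steps emit columns k, k+1, …
theorem loopB (matr : List (List Int)) (l : List (List Int)) :
    ∀ (k : Nat) (acc : List (List Int)),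
    (l.foldl
      (fun (st : List (List Int) × List (List Int)) _ =>
        (st.1 ++ [st.2.map (fun it => it.getD 0 0)], st.2.map List.tail))
      (acc, matr.map (List.drop k))).1
    = acc ++ (List.range' k l.length).map (fun r => matr.map (fun row => row.getD r 0)) := by
  induction l with
  | nil => intro k acc; simp
  | cons x t ih =>
    intro k acc
    rw [List.foldl_cons]
    have hheads : (matr.map (List.drop k)).map (fun it => it.getD 0 0)
        = matr.map (fun row => row.getD k 0) := by
      rw [List.map_map]; apply List.map_congr_left; intro row _
      simp [Function.comp]
    have htails : (matr.map (List.drop k)).map List.tail = matr.map (List.drop (k+1)) := by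
      rw [List.map_map]; apply List.map_congr_left; intro row _
      simp [Function.comp, List.tail_drop]
    simp only [hheads, htails]
    rw [ih (k+1) (acc ++ [matr.map (fun row => row.getD k 0)])]
    simp [List.range'_succ]

theorem B_eq_T (matr : List (List Int)) : diagonal_reverse_alt matr = pvT matr := by
  unfold diagonal_reverse_alt
  simp only []
  have h0 : matr.map (fun row => row) = matr.map (List.drop 0) := by
    apply List.map_congr_left; intro row _; simp
  rw [h0, loopB matr matr 0 []]
  unfold pvT
  rw [show List.range' 0 matr.length = List.range matr.length from List.range_eq_range'.symm]
  simp only [List.nil_append]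
  apply List.map_congr_left
  intro r _
  rw [map_eq_range_map]
  rfl

-- ===== VERDICT (by name: the statement is the Claim_ definition above) =====
theorem diagonal_reverse_spec : Claim_equal_diagonal_reverse := by
  intro matr _ _
  show diagonal_reverse matr = diagonal_reverse_alt matr
  rw [A_eq_T, B_eq_T]
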